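-- pv_equiv track=rewrite | github.com/pisitponjanton/IT-KMITL | PSCP-Y-1/[Midterm 2024]/Scientific Notation.py | numin3
-- ===== SOURCE A (Python) =====
-- def numin3(num):
--     """Scientific Notation"""
--     num1=""
--     num2=""
--     n=0
--     s=-1
--     for i in num:
--         if i.isspace():
--             break
--         if i == ".":
--             n=1
--         if n:
--             s+=1
--         if i!=".":
--             num1+=i
--     s=0 if s==-1 else s
--     for i in num[::-1]:
--         if i.isnumeric():
--             num2+=i
--         else:
--             break
--     return num1,num2,s
-- ===== SOURCE B (Python) =====
-- def numin3(num):
--     """Scientific Notation"""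
--     cut = next((j for j, c in enumerate(num) if c.isspace()), len(num))
--     prefix = num[:cut]
--     num1 = "".join(c for c in prefix if c != ".")
--     s = len(prefix) - prefix.index(".") - 1 if "." in prefix else 0
--     j = len(num)
--     while j > 0 and num[j - 1].isnumeric():
--         j -= 1
--     num2 = num[j:][::-1]
--     return num1, num2, s
-- ===== Notes on version B (the rewrite author's own statement) =====
-- stated objective: simpler
-- what changed: Replaces A's stateful first loop (break, dot flag n, incremental counter s, conditional char-by-char append) with slicing at the first whitespace plus a filter and index arithmetic (len(prefix)-prefix.index('.')-1), and replaces the reversed char-append second loop with an index scan for the trailing numeric run followed by a slice-and-reverse.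
import Mathlib
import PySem

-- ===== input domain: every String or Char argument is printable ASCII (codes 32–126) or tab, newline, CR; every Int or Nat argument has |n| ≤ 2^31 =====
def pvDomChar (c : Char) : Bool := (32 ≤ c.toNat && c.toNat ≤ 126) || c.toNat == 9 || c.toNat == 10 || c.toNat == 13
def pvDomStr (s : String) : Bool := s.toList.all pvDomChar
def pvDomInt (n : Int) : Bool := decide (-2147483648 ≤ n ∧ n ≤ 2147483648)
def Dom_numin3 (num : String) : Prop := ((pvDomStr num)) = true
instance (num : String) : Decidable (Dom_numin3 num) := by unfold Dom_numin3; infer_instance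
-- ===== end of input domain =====

-- B replaces A's stateful scan (break/flag/counter/conditional append) by prefix slicing,
-- a filter and index arithmetic, plus an index scan and slice-reverse for the suffix (objective: simpler).

-- ===== PORT A =====
-- first loop of A: state (num1, n, s), breaks at the first whitespace char
-- (i.isnumeric()/i.isspace() are PySem.Chars.isdigit/isspace — exact on the printable-ASCII+tab/newline/CR domain)
def numin3Loop1 : List Char → List Char → Nat → Int → List Char × Int
  | [], num1, _, s => (num1, s)
  | i :: rest, num1, n, s =>
    if PySem.Chars.isspace i then (num1, s)
    else
      let n' := if i = '.' then 1 else n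
      let s' := if n' ≠ 0 then s + 1 else s
      let num1' := if i ≠ '.' then num1 ++ [i] else num1
      numin3Loop1 rest num1' n' s'

-- second loop of A: over num[::-1], append while numeric, break otherwise
def numin3Loop2 : List Char → List Char → List Char
  | [], num2 => num2
  | i :: rest, num2 =>
    if PySem.Chars.isdigit i then numin3Loop2 rest (num2 ++ [i]) else num2

def numin3 (num : String) : String × String × Int :=
  let p := numin3Loop1 num.toList [] 0 (-1)
  let s : Int := if p.2 = -1 then 0 else p.2
  let num2 := numin3Loop2 num.toList.reverse []
  (String.ofList p.1, String.ofList num2, s)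

-- ===== PORT B =====
-- the while loop of B: j starts at len(num), decremented while num[j-1].isnumeric()
-- (num[j-1] is always in range because of the j > 0 guard, so getD's default is never read)
def numin3AltTrail (cs : List Char) : Nat → Nat
  | 0 => 0
  | j + 1 => if PySem.Chars.isdigit (cs.getD j ' ') then numin3AltTrail cs j else j + 1

def numin3_alt (num : String) : String × String × Int :=
  let cs := num.toList
  -- next((j for j, c in enumerate(num) if c.isspace()), len(num))
  let cut := cs.findIdx (fun c => PySem.Chars.isspace c)
  let pfx := cs.take cut                         -- num[:cut] (0 ≤ cut ≤ len, so take is exact)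
  let num1 := pfx.filter (fun c => c ≠ '.')      -- "".join(c for c in prefix if c != ".")
  -- len(prefix) - prefix.index(".") - 1 if "." in prefix else 0  (index of a single char = list index)
  let s : Int := match PySem.List.index? pfx '.' with
    | some i => (pfx.length : Int) - (i : Int) - 1
    | none => 0
  let j := numin3AltTrail cs cs.length
  let num2 := (cs.drop j).reverse                -- num[j:][::-1] (0 ≤ j ≤ len)
  (String.ofList num1, String.ofList num2, s)

-- ===== PRECONDITION & SPEC =====
def Spec_numin3 (num : String) (out : String × String × Int) : Prop := out = numin3_alt num
instance (num : String) (out : String × String × Int) : Decidable (Spec_numin3 num out) := by unfold Spec_numin3; infer_instance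

-- ===== CLAIM (what is proved, stated in full; the proofs are below) =====
def Claim_equal_numin3 : Prop := ∀ (num : String), Dom_numin3 num → Spec_numin3 num (numin3 num)

-- ===== LEMMAS AND PROOFS =====

-- A's second loop is takeWhile
theorem loop2_eq (l acc : List Char) :
    numin3Loop2 l acc = acc ++ l.takeWhile (fun c => PySem.Chars.isdigit c) := by
  induction l generalizing acc with
  | nil => simp [numin3Loop2]
  | cons c rest ih =>
    simp only [numin3Loop2, List.takeWhile_cons]
    by_cases h : PySem.Chars.isdigit c
    · simp [h, ih]
    · simp [h]

theorem altTrail_le (cs : List Char) (j : Nat) : numin3AltTrail cs j ≤ j := by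
  induction j with
  | zero => simp [numin3AltTrail]
  | succ j ih =>
    simp only [numin3AltTrail]
    split
    · omega
    · omega

theorem altTrail_append (cs : List Char) (c : Char) (j : Nat) (hj : j ≤ cs.length) :
    numin3AltTrail (cs ++ [c]) j = numin3AltTrail cs j := by
  induction j with
  | zero => rfl
  | succ j ih =>
    simp only [numin3AltTrail]
    rw [List.getD_append _ _ _ _ (by omega), ih (by omega)]

theorem altTrail_drop (cs : List Char) :
    cs.drop (numin3AltTrail cs cs.length)
      = (cs.reverse.takeWhile (fun c => PySem.Chars.isdigit c)).reverse := by
  induction cs using List.reverseRecOn with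
  | nil => rfl
  | append_singleton cs c ih =>
    have hlen : (cs ++ [c]).length = cs.length + 1 := by simp
    rw [hlen]
    simp only [numin3AltTrail]
    rw [List.getD_append_right _ _ _ _ (le_refl _)]
    simp only [Nat.sub_self, List.getD_cons_zero]
    by_cases h : PySem.Chars.isdigit c
    · rw [if_pos h, altTrail_append cs c _ (le_refl _)]
      have hle := altTrail_le cs cs.length
      rw [List.drop_append_of_le_length hle, ih]
      simp [h]
    · rw [if_neg h]
      simp [h]

-- A's first loop once n = 1: every remaining prefix char bumps s, dots are skipped
theorem loop1_n1 (l : List Char) (num1 : List Char) (s : Int) :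
    numin3Loop1 l num1 1 s =
      (num1 ++ (l.takeWhile (fun c => !PySem.Chars.isspace c)).filter (fun c => c ≠ '.'),
       s + (l.takeWhile (fun c => !PySem.Chars.isspace c)).length) := by
  induction l generalizing num1 s with
  | nil => simp [numin3Loop1]
  | cons c rest ih =>
    simp only [numin3Loop1, List.takeWhile_cons]
    by_cases hsp : PySem.Chars.isspace c
    · simp [hsp]
    · by_cases hdot : c = '.'
      · subst hdot
        simp [hsp, ih, Prod.ext_iff]
        omega
      · simp [hsp, hdot, ih, Prod.ext_iff]
        omega

-- A's first loop from the initial state (n = 0, s = -1)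
theorem loop1_n0 (l : List Char) (num1 : List Char) :
    numin3Loop1 l num1 0 (-1) =
      (num1 ++ (l.takeWhile (fun c => !PySem.Chars.isspace c)).filter (fun c => c ≠ '.'),
       match PySem.List.index? (l.takeWhile (fun c => !PySem.Chars.isspace c)) '.' with
       | some i => ((l.takeWhile (fun c => !PySem.Chars.isspace c)).length : Int) - (i : Int) - 1
       | none => -1) := by
  induction l generalizing num1 with
  | nil => simp [numin3Loop1, PySem.List.index?]
  | cons c rest ih =>
    simp only [numin3Loop1, List.takeWhile_cons]
    by_cases hsp : PySem.Chars.isspace c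
    · simp [hsp, PySem.List.index?]
    · by_cases hdot : c = '.'
      · subst hdot
        have hsp' : PySem.Chars.isspace '.' = false := eq_false_of_ne_true hsp
        rw [if_pos (show (!PySem.Chars.isspace '.') = true by simp [hsp'])]
        rw [PySem.List.index?_cons_self, if_neg hsp]
        simp only [ne_eq, not_true_eq_false, if_false]
        norm_num
        rw [loop1_n1]
        simp
      · have hsp' : PySem.Chars.isspace c = false := eq_false_of_ne_true hsp
        rw [if_pos (show (!PySem.Chars.isspace c) = true by simp [hsp'])]
        rw [PySem.List.index?_cons_of_ne _ hdot, if_neg hsp]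
        simp only [ne_eq, hdot, not_false_eq_true, if_true, if_false]
        norm_num
        rw [ih]
        simp only [List.filter_cons, Prod.ext_iff]
        constructor
        · simp [hdot]
        · cases h : List.idxOf? '.' (rest.takeWhile (fun c => !PySem.Chars.isspace c)) with
          | none => simp [h]
          | some i => simp [h]

theorem take_findIdx (cs : List Char) (p : Char → Bool) :
    cs.take (cs.findIdx p) = cs.takeWhile (fun c => !p c) := by
  induction cs with
  | nil => rfl
  | cons c rest ih =>
    by_cases h : p c
    · simp [List.findIdx_cons, h]
    · simp [List.findIdx_cons, h, ih]

-- ===== VERDICT (by name: the statement is the Claim_ definition above) =====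
theorem numin3_spec : Claim_equal_numin3 := by
  intro num _
  unfold Spec_numin3 numin3 numin3_alt
  dsimp only
  rw [take_findIdx, loop1_n0, loop2_eq, altTrail_drop]
  simp only [List.nil_append, List.reverse_reverse]
  cases h : PySem.List.index? (num.toList.takeWhile (fun c => !PySem.Chars.isspace c)) '.' with
  | none => simp
  | some i =>
    have : ∃ k, (num.toList.takeWhile (fun c => !PySem.Chars.isspace c)).length = i + 1 + k := by
      rw [PySem.List.index?_eq_some_iff] at h
      obtain ⟨pre, suf, hl, hlen, -⟩ := h
      exact ⟨suf.length, by simp [hl]; omega⟩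
    obtain ⟨k, hk⟩ := this
    rw [hk]
    simp
    omega
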